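-- pv_equiv track=rewrite | github.com/mostgood1/NCAAB | src/ncaab_model/data/team_normalize.py | _expand_directional
-- ===== SOURCE A (Python) =====
-- from typing import Set, Dict
--
-- _DIRECTIONAL_MAP = {
--     "n": "north",
--     "s": "south",
--     "e": "east",
--     "w": "west",
--     "no": "north",
--     "so": "south",
--     "ne": "northeast",
--     "nw": "northwest",
--     "se": "southeast",
--     "sw": "southwest",
-- }
--
-- def _expand_directional(tokens: list[str]) -> Set[str]:
--     out = set()
--     for i,t in enumerate(tokens):
--         if t in _DIRECTIONAL_MAP:
--             mod = tokens[:]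
--             mod[i] = _DIRECTIONAL_MAP[t]
--             out.add(" ".join(mod))
--     return out
-- ===== SOURCE B (Python) =====
-- # B: precompute suffix joins once (back to front) and carry a running prefix join,
-- # so each variant string is assembled in O(1) joins instead of re-joining the whole list.
-- _DIRECTIONAL_MAP = {
--     "n": "north",
--     "s": "south",
--     "e": "east",
--     "w": "west",
--     "no": "north",
--     "so": "south",
--     "ne": "northeast",
--     "nw": "northwest",
--     "se": "southeast",
--     "sw": "southwest",
-- }
--
-- def _expand_directional(tokens):
--     out = set()
--     n = len(tokens)
--     # sufs[i] = " ".join(tokens[i:]) for i < n, built in one backward pass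
--     sufs = [None] * n
--     acc = None
--     for i in range(n - 1, -1, -1):
--         acc = tokens[i] if acc is None else tokens[i] + " " + acc
--         sufs[i] = acc
--     pref = None  # " ".join(tokens[:i]) (None when i == 0)
--     for i, t in enumerate(tokens):
--         v = _DIRECTIONAL_MAP.get(t)
--         if v is not None:
--             tail = sufs[i + 1] if i + 1 < n else None
--             mid = v if tail is None else v + " " + tail
--             out.add(mid if pref is None else pref + " " + mid)
--         pref = t if pref is None else pref + " " + t
--     return out
-- ===== Notes on version B (the rewrite author's own statement) =====
-- stated objective: alternative
-- what changed: Instead of copying the token list and re-joining all tokens for every directional match, B precomputes all suffix joins in one backward pass and carries a running prefix join, assembling each variant from prefix + expansion + suffix; each variant string is Theta(n) chars either way, so the cost is similar.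
import Mathlib
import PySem

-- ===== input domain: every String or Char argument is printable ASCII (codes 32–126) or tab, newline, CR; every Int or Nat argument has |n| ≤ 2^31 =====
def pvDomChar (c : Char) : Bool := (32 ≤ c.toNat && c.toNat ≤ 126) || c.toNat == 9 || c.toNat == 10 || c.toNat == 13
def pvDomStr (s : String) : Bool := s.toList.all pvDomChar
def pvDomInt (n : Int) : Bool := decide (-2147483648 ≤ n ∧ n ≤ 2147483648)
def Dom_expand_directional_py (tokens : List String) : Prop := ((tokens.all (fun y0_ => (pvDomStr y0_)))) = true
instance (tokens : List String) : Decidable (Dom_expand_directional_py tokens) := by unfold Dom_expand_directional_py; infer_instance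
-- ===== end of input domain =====

-- B replaces A's per-match list copy + full re-join by one backward pass of suffix joins
-- plus a running prefix join (objective: alternative algorithm, similar cost).

def dirMap : PySem.Dict String String :=
  PySem.Dict.ofList [("n","north"),("s","south"),("e","east"),("w","west"),("no","north"),("so","south"),
   ("ne","northeast"),("nw","northwest"),("se","southeast"),("sw","southwest")]

-- ===== PORT A =====
-- for i,t in enumerate(tokens): if t in MAP: mod = tokens[:]; mod[i] = MAP[t]; out.add(" ".join(mod))
def expand_directional_py (tokens : List String) : List String :=
  (PySem.List.enumerate tokens).foldl (fun out it =>
    match PySem.Dict.get? dirMap it.2 with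
    | some v => PySem.Set.add out (PySem.Str.join " " (tokens.set it.1.toNat v))
    | none => out) PySem.Set.empty

-- ===== PORT B =====
-- sufs[i] = " ".join(tokens[i:]), built back to front in one pass (Source B's backward loop)
def sufList : List String → List String
  | [] => []
  | t :: rest =>
    match sufList rest with
    | [] => [t]
    | s :: ss => (t ++ " " ++ s) :: s :: ss

-- Source B's forward loop: state = (out, pref); sufs argument = sufList of the remaining tokens
def goB (out : List String) (pref : Option String) : List String → List String → List String
  | [], _ => out
  | t :: rest, sufs =>
    let out' :=
      match PySem.Dict.get? dirMap t with
      | some v =>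
        let mid := match sufs.tail.head? with
          | none => v
          | some s => v ++ " " ++ s
        PySem.Set.add out (match pref with
          | none => mid
          | some p => p ++ " " ++ mid)
      | none => out
    goB out' (some (match pref with | none => t | some p => p ++ " " ++ t)) rest sufs.tail

def expand_directional_py_alt (tokens : List String) : List String :=
  goB PySem.Set.empty none tokens (sufList tokens)

-- ===== PRECONDITION & SPEC =====
def Spec_expand_directional_py (tokens : List String) (out : List String) : Prop := out = expand_directional_py_alt tokens
instance (tokens : List String) (out : List String) : Decidable (Spec_expand_directional_py tokens out) := by unfold Spec_expand_directional_py; infer_instance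

-- ===== CLAIM (what is proved, stated in full; the proofs are below) =====
def Claim_equal_expand_directional_py : Prop := ∀ (tokens : List String), Dom_expand_directional_py tokens → Spec_expand_directional_py tokens (expand_directional_py tokens)

-- ===== LEMMAS AND PROOFS =====

-- proof-side join: jn l = " ".join(l)
def jn : List String → String
  | [] => ""
  | [t] => t
  | t :: r@(_ :: _) => t ++ " " ++ jn r

-- the sequence of variant strings both loops insert, in order
def variants (pre : List String) : List String → List String
  | [] => []
  | t :: rest =>
    (match PySem.Dict.get? dirMap t with
     | some v => [jn (pre ++ v :: rest)]
     | none => []) ++ variants (pre ++ [t]) rest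

theorem jn_cons_ne (t : String) (r : List String) (h : r ≠ []) :
    jn (t :: r) = t ++ " " ++ jn r := by
  match r with
  | [] => exact absurd rfl h
  | b :: r' => simp [jn]

theorem jn_cons_cons (a b : String) (l : List String) :
    jn (a :: b :: l) = a ++ " " ++ jn (b :: l) := by
  simp [jn]

theorem jn_eq_join (l : List String) : PySem.Str.join " " l = jn l := by
  match l with
  | [] => apply String.ext; simp [jn]
  | [a] => apply String.ext; simp [jn, PySem.Chars.join_singleton]
  | a :: b :: r =>
    have ih := jn_eq_join (b :: r)
    have ih' := congrArg String.toList ih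
    simp at ih'
    apply String.ext
    simp [jn, PySem.Chars.join_cons_cons, ih']

theorem jn_append (pre ts : List String) (h : ts ≠ []) :
    jn (pre ++ ts) = match pre with | [] => jn ts | _ :: _ => jn pre ++ " " ++ jn ts := by
  match pre with
  | [] => simp
  | [p] =>
    simp only [List.cons_append, List.nil_append]
    rw [jn_cons_ne p ts h]
    simp [jn]
  | p :: q :: pr =>
    have ih := jn_append (q :: pr) ts h
    simp only [] at ih
    simp only [List.cons_append] at ih ⊢
    rw [jn_cons_cons, jn_cons_cons, ih]
    apply String.ext; simp

theorem sufList_spec (ts : List String) :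
    sufList ts = (match ts with | [] => [] | t :: r => jn (t :: r) :: sufList r) := by
  match ts with
  | [] => rfl
  | t :: r =>
    have ih := sufList_spec r
    match r with
    | [] => simp [sufList, jn]
    | b :: r' =>
      simp only [] at ih ⊢
      rw [show sufList (t :: b :: r') = (match sufList (b :: r') with | [] => [t] | s :: ss => (t ++ " " ++ s) :: s :: ss) from rfl]
      rw [ih]
      simp [jn_cons_cons]

theorem sufList_head (ts : List String) :
    (sufList ts).head? = match ts with | [] => none | _ :: _ => some (jn ts) := by
  rw [sufList_spec]
  match ts with
  | [] => rfl
  | t :: r => rfl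

theorem sufList_tail (t : String) (rest : List String) :
    (sufList (t :: rest)).tail = sufList rest := by
  rw [sufList_spec]
  rfl

theorem set_append_len {α : Type} (pre : List α) (t v : α) (rest : List α) :
    (pre ++ t :: rest).set pre.length v = pre ++ v :: rest := by
  induction pre with
  | nil => rfl
  | cons p pr ih => simp [ih]

theorem goB_cons (out : List String) (pref : Option String) (t : String)
    (rest sufs : List String) :
    goB out pref (t :: rest) sufs =
      goB (match PySem.Dict.get? dirMap t with
           | some v =>
             PySem.Set.add out (match pref with
               | none => (match sufs.tail.head? with | none => v | some s => v ++ " " ++ s)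
               | some p => p ++ " " ++ (match sufs.tail.head? with | none => v | some s => v ++ " " ++ s))
           | none => out)
        (some (match pref with | none => t | some p => p ++ " " ++ t)) rest sufs.tail := by
  conv_lhs => rw [goB.eq_def]

theorem lemA (ts : List String) : ∀ (pre : List String) (out : List String),
    (PySem.List.enumerate ts (pre.length : Int)).foldl (fun out it =>
      match PySem.Dict.get? dirMap it.2 with
      | some v => PySem.Set.add out (PySem.Str.join " " ((pre ++ ts).set it.1.toNat v))
      | none => out) out
    = (variants pre ts).foldl PySem.Set.add out := by
  induction ts with
  | nil => intro pre out; simp [PySem.List.enumerate_nil, variants]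
  | cons t rest ih =>
    intro pre out
    rw [PySem.List.enumerate_cons]
    simp only [List.foldl_cons, variants, List.foldl_append]
    have hfull : pre ++ t :: rest = (pre ++ [t]) ++ rest := by simp
    have hlen : ((pre ++ [t]).length : Int) = (pre.length : Int) + 1 := by
      simp
    have hstep := ih (pre ++ [t])
    rw [hlen] at hstep
    simp only [jn_eq_join] at hstep
    cases hv : PySem.Dict.get? dirMap t with
    | none =>
      simp only [List.foldl_nil, jn_eq_join]
      rw [hfull]
      exact hstep out
    | some v =>
      simp only [List.foldl_cons, List.foldl_nil, Int.toNat_natCast, set_append_len, jn_eq_join]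
      rw [hfull]
      exact hstep _

theorem lemB (ts : List String) : ∀ (pre : List String) (out : List String),
    goB out (match pre with | [] => none | _ :: _ => some (jn pre)) ts (sufList ts)
    = (variants pre ts).foldl PySem.Set.add out := by
  induction ts with
  | nil => intro pre out; simp [goB, variants]
  | cons t rest ih =>
    intro pre out
    rw [goB_cons, sufList_tail, sufList_head]
    have hpre : (some (match (match pre with | [] => none | _ :: _ => some (jn pre)) with
                 | none => t | some p => p ++ " " ++ t) : Option String)
        = (match pre ++ [t] with | [] => none | _ :: _ => some (jn (pre ++ [t]))) := by
      cases pre with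
      | nil => simp [jn]
      | cons p pr =>
        have h := jn_append (p :: pr) [t] (by simp)
        simp only [] at h
        simp only [List.cons_append] at h ⊢
        simp [h, jn]
    rw [hpre]
    have hmid : ∀ v' : String,
        (match (match rest with | ([] : List String) => (none : Option String) | _ :: _ => some (jn rest)) with
         | none => v' | some s => v' ++ " " ++ s) = jn (v' :: rest) := by
      intro v'
      cases rest with
      | nil => simp [jn]
      | cons b r => simpa using (jn_cons_ne v' (b :: r) (by simp)).symm
    have hadd : ∀ v' : String,
        (match (match pre with | ([] : List String) => (none : Option String) | _ :: _ => some (jn pre)) with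
         | none => jn (v' :: rest) | some p => p ++ " " ++ jn (v' :: rest)) = jn (pre ++ v' :: rest) := by
      intro v'
      cases pre with
      | nil => simp
      | cons p pr =>
        have h := jn_append (p :: pr) (v' :: rest) (by simp)
        simp only [] at h
        simpa using h.symm
    cases hv : PySem.Dict.get? dirMap t with
    | none =>
      simp only [hv, variants, List.nil_append]
      exact ih (pre ++ [t]) out
    | some v =>
      simp only [hv, hmid v, hadd v, variants, List.foldl_append, List.foldl_cons, List.foldl_nil]
      exact ih (pre ++ [t]) _

-- ===== VERDICT (by name: the statement is the Claim_ definition above) =====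
theorem expand_directional_py_spec : Claim_equal_expand_directional_py := by
  intro tokens _
  unfold Spec_expand_directional_py expand_directional_py expand_directional_py_alt
  have hA := lemA tokens [] PySem.Set.empty
  have hB := lemB tokens [] PySem.Set.empty
  simpa using hA.trans hB.symm
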